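-- pv_equiv track=rewrite | github.com/Czerny100/Baekjoon- | 프로그래머스/0/181834. l로 만들기/l로 만들기.py | solution
-- ===== SOURCE A (Python) =====
-- def solution(myString):
--     result = ""
--     for s in myString:
--         if ord(s) < ord("l"):
--             result += "l"
--         else:
--             result += s
--     return result
-- ===== SOURCE B (Python) =====
-- # B: build a translation table mapping every codepoint below 'l' to 'l', then
-- # delegate to str.translate — no per-character loop or branch of our own.
-- _TABLE = {i: ord("l") for i in range(ord("l"))}
--
-- def solution(myString):
--     return myString.translate(_TABLE)
-- ===== Notes on version B (the rewrite author's own statement) =====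
-- stated objective: faster
-- what changed: Replaces the explicit per-character loop with branch and quadratic string concatenation by a precomputed translation table (codepoints below ord('l') map to ord('l')) applied in a single str.translate pass.
import Mathlib
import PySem

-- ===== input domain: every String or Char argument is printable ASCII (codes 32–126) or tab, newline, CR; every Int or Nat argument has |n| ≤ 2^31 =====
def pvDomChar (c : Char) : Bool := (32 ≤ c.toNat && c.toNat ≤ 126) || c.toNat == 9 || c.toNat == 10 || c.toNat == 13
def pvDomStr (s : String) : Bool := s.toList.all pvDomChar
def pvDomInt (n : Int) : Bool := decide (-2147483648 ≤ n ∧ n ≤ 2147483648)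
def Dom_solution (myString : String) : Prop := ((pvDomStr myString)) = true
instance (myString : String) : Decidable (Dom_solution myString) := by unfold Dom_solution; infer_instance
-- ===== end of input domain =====

-- B replaces A's per-character loop/branch/concatenation by a precomputed
-- translation table (codepoints below ord('l') ↦ 'l') applied in one translate pass.

-- ===== PORT A =====
def solution (myString : String) : String :=
  myString.toList.foldl
    (fun result s =>
      if (s.toNat : Int) < (('l'.toNat : Int)) then result ++ "l" else result ++ String.ofList [s])
    ""

-- ===== PORT B =====
-- _TABLE = {i: ord("l") for i in range(ord("l"))}
def pvTable : PySem.Dict Int Int :=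
  (PySem.List.pyRange 0 ('l'.toNat : Int) 1).foldl
    (fun d i => d.insert i ('l'.toNat : Int)) PySem.Dict.empty

-- myString.translate(_TABLE): each char whose codepoint is a key of the table is
-- replaced by the char of the mapped codepoint; others are kept (exact here: the
-- table maps only to valid codepoints and never to None/str).
def solution_alt (myString : String) : String :=
  String.ofList (myString.toList.map (fun c =>
    match pvTable.get? (c.toNat : Int) with
    | some v => Char.ofNat v.toNat
    | none => c))

-- ===== PRECONDITION & SPEC =====
def Spec_solution (myString : String) (out : String) : Prop := out = solution_alt myString
instance (myString : String) (out : String) : Decidable (Spec_solution myString out) := by unfold Spec_solution; infer_instance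

-- ===== CLAIM (what is proved, stated in full; the proofs are below) =====
def Claim_equal_solution : Prop := ∀ (myString : String), Dom_solution myString → Spec_solution myString (solution myString)

-- ===== LEMMAS AND PROOFS =====

theorem pvTable_foldl_get? (L : List Int) (d : PySem.Dict Int Int) (k : Int) :
    (L.foldl (fun d i => d.insert i ('l'.toNat : Int)) d).get? k
      = if k ∈ L then some ('l'.toNat : Int) else d.get? k := by
  induction L generalizing d with
  | nil => simp
  | cons i rest ih =>
      simp only [List.foldl_cons, ih, List.mem_cons, PySem.Dict.get?_insert]
      by_cases h1 : k ∈ rest <;> by_cases h2 : k = i <;> simp [h1, h2]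

theorem pvTable_get? (k : Int) :
    pvTable.get? k = if 0 ≤ k ∧ k < 108 then some 108 else none := by
  unfold pvTable
  rw [pvTable_foldl_get?]
  simp [PySem.List.mem_pyRange_one]

theorem pvChar_step (c : Char) :
    (match pvTable.get? (c.toNat : Int) with
      | some v => Char.ofNat v.toNat
      | none => c)
      = if (c.toNat : Int) < (('l'.toNat : Int)) then 'l' else c := by
  rw [pvTable_get?]
  by_cases h : (c.toNat : Int) < 108
  · have hc : c.toNat < 'l'.toNat := by exact_mod_cast h
    have : (0 : Int) ≤ (c.toNat : Int) ∧ (c.toNat : Int) < 108 := ⟨Int.natCast_nonneg _, h⟩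
    rw [if_pos this, if_pos (by exact_mod_cast h : (c.toNat : Int) < ('l'.toNat : Int))]
    rfl
  · have : ¬ ((0 : Int) ≤ (c.toNat : Int) ∧ (c.toNat : Int) < 108) := fun hc => h hc.2
    rw [if_neg this, if_neg (by exact_mod_cast h : ¬ (c.toNat : Int) < ('l'.toNat : Int))]

theorem hcons_ofList (x : Char) (l : List Char) :
    String.ofList (x :: l) = String.ofList [x] ++ String.ofList l := by
  rw [← String.ofList_append]
  rfl

theorem pvFold_eq (L : List Char) (acc : String) :
    (L.foldl
      (fun result s =>
        if (s.toNat : Int) < (('l'.toNat : Int)) then result ++ "l" else result ++ String.ofList [s])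
      acc)
      = acc ++ String.ofList (L.map (fun c =>
          match pvTable.get? (c.toNat : Int) with
          | some v => Char.ofNat v.toNat
          | none => c)) := by
  induction L generalizing acc with
  | nil => simp
  | cons c rest ih =>
      simp only [List.foldl_cons, List.map_cons, ih, pvChar_step]
      split_ifs with h
      · conv_rhs => rw [hcons_ofList]
        rw [← String.append_assoc]
      · conv_rhs => rw [hcons_ofList]
        rw [← String.append_assoc]

-- ===== VERDICT (by name: the statement is the Claim_ definition above) =====
theorem solution_spec : Claim_equal_solution := by
  intro myString _
  unfold Spec_solution solution solution_alt
  rw [pvFold_eq]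
  simp
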